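-- pv_equiv track=rewrite | github.com/AmanuelD02/Competitive-Programming | contest/may/all/q2.py | hiddenStudents
-- ===== SOURCE A (Python) =====
-- def hiddenStudents(column):
--     height = column[-1]
--     total = 0
--
--     for i in range(len(column)-2, -1,-1):
--         h = column[i]
--         if h < height:
--             total += 1
--         height = max(height, h)
--
--     return total
-- ===== SOURCE B (Python) =====
-- def hiddenStudents(column):
--     # suffix-maximum table: rmax[i] = max(column[i+1:]) for i < len(column)-1,
--     # then count strictly smaller elements in a separate pass
--     rmax = []
--     acc = column[-1]
--     for h in reversed(column[:-1]):
--         rmax.append(acc)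
--         acc = max(acc, h)
--     rmax.reverse()
--     return sum(h < m for h, m in zip(column, rmax))
-- ===== Notes on version B (the rewrite author's own statement) =====
-- stated objective: alternative
-- what changed: B precomputes a suffix-maximum table in one pass and then counts column[i] < rmax[i] in a separate zip pass, instead of A's single index-countdown loop that interleaves max-tracking with counting.
import Mathlib
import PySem

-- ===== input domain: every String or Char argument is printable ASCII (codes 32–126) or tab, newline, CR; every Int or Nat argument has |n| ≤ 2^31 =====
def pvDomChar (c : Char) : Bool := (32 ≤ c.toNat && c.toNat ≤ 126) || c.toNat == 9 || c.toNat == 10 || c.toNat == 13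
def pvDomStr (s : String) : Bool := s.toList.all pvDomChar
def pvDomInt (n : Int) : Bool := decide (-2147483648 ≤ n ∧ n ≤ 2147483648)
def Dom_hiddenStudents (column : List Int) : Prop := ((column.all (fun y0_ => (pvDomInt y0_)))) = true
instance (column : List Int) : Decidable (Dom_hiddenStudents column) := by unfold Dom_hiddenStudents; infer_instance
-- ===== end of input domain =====

-- B builds a suffix-maximum table and counts in a separate zip pass, instead of A's single
-- interleaved countdown loop; same cost, different decomposition. Equivalence on nonempty lists.

-- ===== PORT A =====
def hiddenStudents (column : List Int) : Int :=
  let height : Int := PySem.List.pyGetD column (-1) 0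
  let st := (PySem.List.pyRange ((column.length : Int) - 2) (-1) (-1)).foldl
    (fun (st : Int × Int) i =>
      let h := PySem.List.pyGetD column i 0
      let total := if h < st.1 then st.2 + 1 else st.2
      (max st.1 h, total)) (height, 0)
  st.2

-- ===== PORT B =====
def hiddenStudents_alt (column : List Int) : Int :=
  let acc0 : Int := PySem.List.pyGetD column (-1) 0
  let st := ((PySem.List.slice column none (some (-1))).reverse).foldl
    (fun (st : List Int × Int) h => (st.1 ++ [st.2], max st.2 h)) (([] : List Int), acc0)
  let rmax := st.1.reverse
  (column.zip rmax).foldl (fun t p => t + (if p.1 < p.2 then (1 : Int) else 0)) 0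

-- ===== PRECONDITION & SPEC =====
-- Pre_ excludes only the empty list, on which the last-element access raises IndexError in both A and B.
def Pre_hiddenStudents (column : List Int) : Prop := column ≠ []
instance (column : List Int) : Decidable (Pre_hiddenStudents column) := by unfold Pre_hiddenStudents; infer_instance
def pvWitness_hiddenStudents : List Int := [3, 1, 2]

def Spec_hiddenStudents (column : List Int) (out : Int) : Prop := out = hiddenStudents_alt column
instance (column : List Int) (out : Int) : Decidable (Spec_hiddenStudents column out) := by unfold Spec_hiddenStudents; infer_instance

-- ===== CLAIM (what is proved, stated in full; the proofs are below) =====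
def Claim_equal_hiddenStudents : Prop := ∀ (column : List Int), Dom_hiddenStudents column → Pre_hiddenStudents column → Spec_hiddenStudents column (hiddenStudents column)

-- ===== LEMMAS AND PROOFS =====

-- count of h < (running max), as both programs compute it
def pvCnt : List Int → Int → Int
  | [], _ => 0
  | h :: tl, a => (if h < a then 1 else 0) + pvCnt tl (max a h)

-- the list of running maxes B records (rmax in reversed order)
def pvBuilt : List Int → Int → List Int
  | [], _ => []
  | h :: tl, a => a :: pvBuilt tl (max a h)

theorem pvBuilt_length (ys : List Int) (a : Int) : (pvBuilt ys a).length = ys.length := by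
  induction ys generalizing a with
  | nil => rfl
  | cons h tl ih => simp [pvBuilt, ih]

-- A's fold, with the accumulator pulled out
theorem pvFoldA (ys : List Int) (a t : Int) :
    (ys.foldl (fun (st : Int × Int) h =>
      (max st.1 h, if h < st.1 then st.2 + 1 else st.2)) (a, t)).2 = t + pvCnt ys a := by
  induction ys generalizing a t with
  | nil => simp [pvCnt]
  | cons h tl ih =>
      simp only [List.foldl_cons, ih, pvCnt]
      split_ifs <;> ring

-- B's building fold produces pvBuilt
theorem pvFoldB (ys : List Int) (r : List Int) (a : Int) :
    (ys.foldl (fun (st : List Int × Int) h => (st.1 ++ [st.2], max st.2 h)) (r, a)).1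
      = r ++ pvBuilt ys a := by
  induction ys generalizing r a with
  | nil => simp [pvBuilt]
  | cons h tl ih => simp [pvBuilt, ih]

-- B's counting sum over the zip with the running maxes is pvCnt
theorem pvZipSum (ys : List Int) (a : Int) :
    ((ys.zip (pvBuilt ys a)).map (fun p => if p.1 < p.2 then (1 : Int) else 0)).sum
      = pvCnt ys a := by
  induction ys generalizing a with
  | nil => simp [pvBuilt, pvCnt]
  | cons h tl ih => simp [pvBuilt, pvCnt, List.zip_cons_cons, ih]

-- A's index countdown loop reads (xs.take k).reverse
theorem pvRangeFold {β : Type} (step : β → Int → β) (xs : List Int) (k : Nat)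
    (hk : k ≤ xs.length) (init : β) :
    (PySem.List.pyRange ((k : Int) - 1) (-1) (-1)).foldl
        (fun st i => step st (PySem.List.pyGetD xs i 0)) init
      = ((xs.take k).reverse).foldl step init := by
  induction k generalizing init with
  | zero =>
      rw [PySem.List.pyRange_neg_one_eq_nil (by omega)]
      simp
  | succ k ih =>
      have hk' : k < xs.length := by omega
      have hcast : ((k + 1 : Nat) : Int) - 1 = (k : Int) := by push_cast; ring
      rw [hcast, PySem.List.pyRange_neg_one_cons (by omega)]
      simp only [List.foldl_cons]
      rw [ih (by omega)]
      have hget : PySem.List.pyGetD xs (k : Int) 0 = xs[k] := by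
        rw [PySem.List.pyGetD_natCast]; exact List.getD_eq_getElem xs 0 hk'
      rw [hget, List.take_add_one, List.getElem?_eq_getElem hk']
      simp only [Option.toList_some, List.reverse_append, List.reverse_cons, List.reverse_nil,
        List.nil_append, List.cons_append, List.foldl_cons]

theorem pvMain (l : List Int) (z : Int) :
    hiddenStudents (l ++ [z]) = hiddenStudents_alt (l ++ [z]) := by
  -- A's side
  have hA : hiddenStudents (l ++ [z]) = pvCnt l.reverse z := by
    unfold hiddenStudents
    simp only [PySem.List.pyGetD_neg_one_append_singleton]
    have hlen : ((l ++ [z]).length : Int) - 2 = ((l.length : Nat) : Int) - 1 := by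
      simp [List.length_append]; omega
    rw [hlen, pvRangeFold (fun (st : Int × Int) h =>
          (max st.1 h, if h < st.1 then st.2 + 1 else st.2)) (l ++ [z]) l.length
          (by simp) (z, 0), List.take_left, pvFoldA]
    simp
  -- B's side
  have hB : hiddenStudents_alt (l ++ [z]) = pvCnt l.reverse z := by
    unfold hiddenStudents_alt
    simp only [PySem.List.pyGetD_neg_one_append_singleton, PySem.List.slice_to_neg_one,
      List.dropLast_concat]
    rw [pvFoldB]
    simp only [List.nil_append]
    have hzip : (l ++ [z]).zip (pvBuilt l.reverse z).reverse
        = l.zip (pvBuilt l.reverse z).reverse := by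
      have hlen : l.length = ((pvBuilt l.reverse z).reverse).length := by
        simp [pvBuilt_length]
      calc (l ++ [z]).zip (pvBuilt l.reverse z).reverse
          = (l ++ [z]).zip ((pvBuilt l.reverse z).reverse ++ []) := by simp
        _ = l.zip (pvBuilt l.reverse z).reverse ++ [z].zip [] := List.zip_append hlen
        _ = l.zip (pvBuilt l.reverse z).reverse := by simp
    rw [hzip]
    have hlen2 : l.reverse.length = (pvBuilt l.reverse z).length := by
      simp [pvBuilt_length]
    have hrev : l.zip (pvBuilt l.reverse z).reverse
        = (l.reverse.zip (pvBuilt l.reverse z)).reverse := by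
      rw [List.zip_eq_zipWith, List.zip_eq_zipWith, List.reverse_zipWith hlen2,
        List.reverse_reverse]
    rw [hrev, PySem.List.foldl_add]
    simp only [List.map_reverse, List.sum_reverse, zero_add]
    exact pvZipSum l.reverse z
  rw [hA, hB]

-- ===== VERDICT (by name: the statement is the Claim_ definition above) =====
theorem hiddenStudents_spec : Claim_equal_hiddenStudents := by
  intro column _ hpre
  rcases column.eq_nil_or_concat with h | ⟨l, z, rfl⟩
  · exact absurd h hpre
  · unfold Spec_hiddenStudents
    rw [List.concat_eq_append]
    exact pvMain l z
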